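-- pv_equiv track=rewrite | github.com/synqratech/omega-walls | omega/projector/gapped_rules.py | _has_negation_near
-- ===== SOURCE A (Python) =====
-- from typing import Any, Dict, Iterable, List, Sequence
--
-- def _marker_in_window(window_tokens: Sequence[str], marker: str) -> bool:
--     marker_tokens = [t for t in str(marker).split() if t]
--     if not marker_tokens:
--         return False
--     if len(marker_tokens) == 1:
--         return marker_tokens[0] in window_tokens
--     for i in range(0, max(0, len(window_tokens) - len(marker_tokens) + 1)):
--         if list(window_tokens[i : i + len(marker_tokens)]) == marker_tokens:
--             return True
--     return False
--
-- def _has_negation_near(tokens: Sequence[str], positions: Sequence[int], neg_markers: Sequence[str], window: int) -> bool: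
--     if not positions:
--         return False
--     for idx in positions:
--         left = max(0, int(idx) - int(window))
--         right = min(len(tokens), int(idx) + int(window) + 1)
--         span = tokens[left:right]
--         for marker in neg_markers:
--             if _marker_in_window(span, str(marker)):
--                 return True
--     return False
-- ===== SOURCE B (Python) =====
-- # B: for each marker, split it once and compute its occurrence start indices in tokens once,
-- # then test every query position's window interval [lo, hi) against those starts -- instead of
-- # re-splitting the marker and re-scanning a fresh slice of tokens per (position, marker) pair.
-- def _has_negation_near(tokens, positions, neg_markers, window):
--     n = len(tokens)
--     bounds = []
--     for i in positions:
--         lo = max(0, int(i) - int(window))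
--         hi = min(n, int(i) + int(window) + 1)
--         if lo < hi:
--             bounds.append((lo, hi))
--     if not bounds:
--         return False
--     for marker in neg_markers:
--         mt = str(marker).split()
--         if not mt:
--             continue
--         L = len(mt)
--         starts = [j for j in range(n + 1 - L) if list(tokens[j:j + L]) == mt]
--         for lo, hi in bounds:
--             if any(lo <= j and j + L <= hi for j in starts):
--                 return True
--     return False
-- ===== Notes on version B (the rewrite author's own statement) =====
-- stated objective: faster
-- what changed: B splits each marker and computes its occurrence start indices in tokens once (markers outer loop, positions' window bounds precomputed once), answering each query by testing the window interval [lo,hi) against those starts, instead of re-splitting the marker and re-scanning a fresh slice of tokens for every (position, marker) pair as A does.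
-- outside the precondition, e.g. on _has_negation_near(['not', 'good'], [-2], ['not'], 0): A returns True, B returns False
import Mathlib
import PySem

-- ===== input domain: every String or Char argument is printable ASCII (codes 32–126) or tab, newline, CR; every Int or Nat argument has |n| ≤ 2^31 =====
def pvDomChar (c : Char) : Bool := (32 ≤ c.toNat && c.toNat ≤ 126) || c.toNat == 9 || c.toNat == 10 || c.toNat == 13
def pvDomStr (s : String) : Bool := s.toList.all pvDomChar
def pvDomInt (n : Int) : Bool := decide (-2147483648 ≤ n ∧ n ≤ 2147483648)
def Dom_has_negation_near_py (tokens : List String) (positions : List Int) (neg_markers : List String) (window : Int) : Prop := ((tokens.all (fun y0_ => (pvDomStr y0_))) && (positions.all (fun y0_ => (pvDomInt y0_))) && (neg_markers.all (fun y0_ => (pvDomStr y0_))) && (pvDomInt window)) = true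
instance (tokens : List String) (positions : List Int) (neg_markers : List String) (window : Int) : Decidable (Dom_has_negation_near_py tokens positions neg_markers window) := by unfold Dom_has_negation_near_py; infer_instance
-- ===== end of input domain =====

-- B splits each marker and computes its occurrence start indices in tokens once, then tests
-- every query position's window interval against those starts, instead of re-splitting the
-- marker and re-scanning a fresh slice of tokens per (position, marker) pair as A does.

-- ===== PORT A =====
def marker_in_window_py (window_tokens : List String) (marker : String) : Bool :=
  let marker_tokens := (PySem.Str.split₀ marker).filter (fun t => t ≠ "")
  if marker_tokens = [] then false
  else if marker_tokens.length = 1 then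
    window_tokens.contains marker_tokens[0]!
  else
    (PySem.List.pyRange 0 (max 0 ((window_tokens.length : Int) - marker_tokens.length + 1)) 1).any
      (fun i => PySem.List.slice window_tokens (some i) (some (i + marker_tokens.length)) == marker_tokens)

def has_negation_near_py (tokens : List String) (positions : List Int) (neg_markers : List String) (window : Int) : Bool :=
  if positions = [] then false
  else positions.any (fun idx =>
    let left := max 0 (idx - window)
    let right := min (tokens.length : Int) (idx + window + 1)
    let span := PySem.List.slice tokens (some left) (some right)
    neg_markers.any (fun marker => marker_in_window_py span marker))

-- ===== PORT B =====
-- tokens[j:j+L] with j, L natural numbers is ported directly as drop/take (= PySem.List.slice_natCast_add).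
def has_negation_near_py_alt (tokens : List String) (positions : List Int) (neg_markers : List String) (window : Int) : Bool :=
  let n := tokens.length
  let bounds := positions.foldl (fun acc i =>
    let lo := max 0 (i - window)
    let hi := min (n : Int) (i + window + 1)
    if lo < hi then acc ++ [(lo, hi)] else acc) []
  if bounds = [] then false
  else neg_markers.any (fun marker =>
    let mt := PySem.Str.split₀ marker
    if mt = [] then false
    else
      let starts := (List.range (n + 1 - mt.length)).filter
        (fun j => (tokens.drop j).take mt.length = mt)
      bounds.any (fun b => starts.any (fun j =>
        decide (b.1 ≤ (j : Int)) && decide ((j : Int) + mt.length ≤ b.2))))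

-- ===== PRECONDITION & SPEC =====
-- Pre_ excludes only the inputs where some position's window end idx+window+1 is negative while
-- the Python slice tokens[left : idx+window+1] is still nonempty (a negative stop counts from the
-- end of the list): there A scans a wrapped-around span, an accident of slicing outside the
-- intended use; B treats the window as the index interval [left, idx+window+1), empty there.
def Pre_has_negation_near_py (tokens : List String) (positions : List Int) (neg_markers : List String) (window : Int) : Prop :=
  ∀ idx ∈ positions,
    0 ≤ idx + window + 1 ∨ (tokens.length : Int) + (idx + window + 1) ≤ max 0 (idx - window)
instance (tokens : List String) (positions : List Int) (neg_markers : List String) (window : Int) : Decidable (Pre_has_negation_near_py tokens positions neg_markers window) := by unfold Pre_has_negation_near_py; infer_instance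

def pvWitness_has_negation_near_py : List String × List Int × List String × Int :=
  (["no", "good", "sign"], [1, 2], ["no", "not at all"], 1)

def Spec_has_negation_near_py (tokens : List String) (positions : List Int) (neg_markers : List String) (window : Int) (out : Bool) : Prop := out = has_negation_near_py_alt tokens positions neg_markers window
instance (tokens : List String) (positions : List Int) (neg_markers : List String) (window : Int) (out : Bool) : Decidable (Spec_has_negation_near_py tokens positions neg_markers window out) := by unfold Spec_has_negation_near_py; infer_instance

-- ===== CLAIM (what is proved, stated in full; the proofs are below) =====
def Claim_equal_has_negation_near_py : Prop := ∀ (tokens : List String) (positions : List Int) (neg_markers : List String) (window : Int), Dom_has_negation_near_py tokens positions neg_markers window → Pre_has_negation_near_py tokens positions neg_markers window → Spec_has_negation_near_py tokens positions neg_markers window (has_negation_near_py tokens positions neg_markers window)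

-- ===== LEMMAS AND PROOFS =====

-- every token produced by Python's str.split() is a nonempty string
theorem split0_go_ne_nil (s : List Char) : ∀ (cur : List Char) (acc : List (List Char)),
    (∀ x ∈ acc, x ≠ []) → ∀ t ∈ PySem.Chars.split₀.go s cur acc, t ≠ [] := by
  induction s with
  | nil =>
    intro cur acc hacc t ht
    simp only [PySem.Chars.split₀.go] at ht
    split at ht
    · exact hacc t (by simpa using ht)
    · rename_i hne
      rcases (by simpa using ht : t ∈ acc ∨ t = cur.reverse) with h | h
      · exact hacc t h
      · subst h
        simp only [List.isEmpty_iff] at hne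
        intro hc; exact hne (by simpa using congrArg List.reverse hc)
  | cons c rest ih =>
    intro cur acc hacc t ht
    simp only [PySem.Chars.split₀.go] at ht
    split at ht
    · split at ht
      · exact ih [] acc hacc t ht
      · rename_i hne
        refine ih [] (cur.reverse :: acc) ?_ t ht
        intro x hx
        rcases hx with _ | hx
        · simp only [List.isEmpty_iff] at hne
          intro hc; exact hne (by simpa using congrArg List.reverse hc)
        · exact hacc x (by assumption)
    · exact ih (c :: cur) acc hacc t ht

theorem mem_split0_ne_empty (m t : String) (h : t ∈ PySem.Str.split₀ m) : t ≠ "" := by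
  simp only [PySem.Str.split₀, List.mem_map] at h
  obtain ⟨l, hl, rfl⟩ := h
  have hne : l ≠ [] := split0_go_ne_nil m.toList [] [] (by simp) l hl
  intro hc
  exact hne (by simpa [String.toList_ofList] using congrArg String.toList hc)

theorem mem_iff_take_one {α : Type} (ws : List α) (h : α) :
    h ∈ ws ↔ ∃ i : Nat, (ws.drop i).take 1 = [h] := by
  constructor
  · intro hm
    obtain ⟨i, hi, rfl⟩ := List.mem_iff_getElem.mp hm
    exact ⟨i, by rw [List.drop_eq_getElem_cons hi]; rfl⟩
  · rintro ⟨i, hi⟩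
    have : h ∈ (ws.drop i).take 1 := by rw [hi]; simp
    exact List.mem_of_mem_drop (List.mem_of_mem_take this)

-- an occurrence of mt inside the window tokens[a:b] is an occurrence of mt in tokens
-- whose index interval [j, j+|mt|) lies inside [a, b)
theorem occ_bridge {α : Type} (tokens mt : List α) (a b : Nat) (hmt : mt ≠ []) :
    (∃ i : Nat, (((tokens.drop a).take (b - a)).drop i).take mt.length = mt) ↔
    (∃ j : Nat, a ≤ j ∧ j + mt.length ≤ b ∧ (tokens.drop j).take mt.length = mt) := by
  have hL : 0 < mt.length := List.length_pos_iff.mpr hmt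
  constructor
  · rintro ⟨i, hi⟩
    rw [List.drop_take, List.drop_drop, List.take_take] at hi
    have hlen := congrArg List.length hi
    simp only [List.length_take, List.length_drop] at hlen
    have hkey : a + i + mt.length ≤ b := by omega
    have hmin : min mt.length (b - a - i) = mt.length := by omega
    rw [hmin] at hi
    exact ⟨a + i, by omega, hkey, hi⟩
  · rintro ⟨j, hja, hjb, hj⟩
    refine ⟨j - a, ?_⟩
    rw [List.drop_take, List.drop_drop, List.take_take]
    have h1 : a + (j - a) = j := by omega
    have h2 : min mt.length (b - a - (j - a)) = mt.length := by
      have hlen := congrArg List.length hj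
      simp only [List.length_take, List.length_drop] at hlen
      omega
    rw [h1, h2, hj]

-- A's _marker_in_window finds the marker iff the marker's token list occurs somewhere in ws
theorem miw_iff (ws : List String) (marker : String) :
    marker_in_window_py ws marker = true ↔
    (PySem.Str.split₀ marker ≠ [] ∧
      ∃ i : Nat, (ws.drop i).take (PySem.Str.split₀ marker).length = PySem.Str.split₀ marker) := by
  have hfilt : (PySem.Str.split₀ marker).filter (fun t => decide (t ≠ "")) = PySem.Str.split₀ marker :=
    List.filter_eq_self.mpr (fun a ha => by simpa using mem_split0_ne_empty _ _ ha)
  unfold marker_in_window_py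
  simp only [hfilt]
  generalize PySem.Str.split₀ marker = mt
  by_cases h0 : mt = []
  · simp [h0]
  · simp only [if_neg h0]
    by_cases h1 : mt.length = 1
    · obtain ⟨h, rfl⟩ := List.length_eq_one_iff.mp h1
      simp only [if_pos h1, List.getElem!_cons_zero]
      rw [List.contains_iff_mem, mem_iff_take_one]
      simp [h0]
    · simp only [if_neg h1]
      rw [List.any_eq_true]
      constructor
      · rintro ⟨iZ, hmem, heq⟩
        obtain ⟨hge, hlt⟩ := PySem.List.mem_pyRange_one.mp hmem
        rw [beq_iff_eq] at heq
        rw [PySem.List.slice_toNat _ hge (by positivity)] at heq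
        have hnt : (iZ + (mt.length : Int)).toNat - iZ.toNat = mt.length := by omega
        rw [hnt] at heq
        exact ⟨h0, iZ.toNat, heq⟩
      · rintro ⟨-, i, hi⟩
        refine ⟨(i : Int), ?_, ?_⟩
        · have hlen := congrArg List.length hi
          simp only [List.length_take, List.length_drop] at hlen
          have hL1 : 0 < mt.length := List.length_pos_iff.mpr h0
          apply PySem.List.mem_pyRange_one.mpr
          constructor
          · positivity
          · have hib : i + mt.length ≤ ws.length := by omega
            have : (i : Int) < (ws.length : Int) - mt.length + 1 := by omega
            omega
        · rw [beq_iff_eq, PySem.List.slice_toNat _ (by positivity) (by positivity)]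
          have hnt : ((i : Int) + (mt.length : Int)).toNat - ((i : Int)).toNat = mt.length := by omega
          rw [hnt]
          simpa using hi

-- per marker: A's scan of the slice tokens[lo:hi] agrees with B's interval test on the
-- precomputed occurrence starts
theorem per_marker (tokens : List String) (marker : String) (lo hi : Int)
    (hlo : 0 ≤ lo) (hhi : 0 ≤ hi) :
    marker_in_window_py (PySem.List.slice tokens (some lo) (some hi)) marker =
      (decide (PySem.Str.split₀ marker ≠ []) &&
        ((List.range (tokens.length + 1 - (PySem.Str.split₀ marker).length)).filter
            (fun j => decide ((tokens.drop j).take (PySem.Str.split₀ marker).length = PySem.Str.split₀ marker))).any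
          (fun j => decide (lo ≤ (j : Int)) && decide ((j : Int) + (PySem.Str.split₀ marker).length ≤ hi))) := by
  rw [Bool.eq_iff_iff]
  rw [PySem.List.slice_toNat _ hlo hhi, miw_iff]
  generalize PySem.Str.split₀ marker = mt
  by_cases h0 : mt = []
  · simp [h0]
  · have hL : 0 < mt.length := List.length_pos_iff.mpr h0
    rw [occ_bridge tokens mt lo.toNat hi.toNat h0]
    simp only [Bool.and_eq_true, List.any_eq_true, List.mem_filter, List.mem_range,
      decide_eq_true_eq, ne_eq, h0, not_false_eq_true, true_and]
    constructor
    · rintro ⟨j, hja, hjb, hj⟩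
      have hjn : j + mt.length ≤ tokens.length := by
        have hlen := congrArg List.length hj
        simp only [List.length_take, List.length_drop] at hlen
        omega
      exact ⟨j, ⟨by omega, hj⟩, by omega, by omega⟩
    · rintro ⟨j, ⟨hjr, hj⟩, hjlo, hjhi⟩
      exact ⟨j, by omega, by omega, hj⟩

theorem miw_nil (marker : String) : marker_in_window_py [] marker = false := by
  rw [← Bool.not_eq_true, miw_iff]
  rintro ⟨h0, i, hi⟩
  simp only [List.drop_nil, List.take_nil] at hi
  exact h0 hi.symm

theorem any_any_comm {α β : Type} (l : List α) (r : List β) (f : α → β → Bool) :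
    (l.any fun x => r.any fun y => f x y) = (r.any fun y => l.any fun x => f x y) := by
  rw [Bool.eq_iff_iff]
  simp only [List.any_eq_true]
  constructor
  · rintro ⟨x, hx, y, hy, h⟩; exact ⟨y, hy, x, hx, h⟩
  · rintro ⟨y, hy, x, hx, h⟩; exact ⟨x, hx, y, hy, h⟩

theorem if_false_any {α : Type} (c : Prop) [Decidable c] (l : List α) (f : α → Bool) :
    (if c then false else l.any f) = l.any (fun x => if c then false else f x) := by
  by_cases h : c <;> simp [h]

-- per (position, marker) pair, under Pre_'s per-position condition
theorem pair_eq (tokens : List String) (marker : String) (idx window : Int)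
    (hc : 0 ≤ idx + window + 1 ∨
      (tokens.length : Int) + (idx + window + 1) ≤ max 0 (idx - window)) :
    marker_in_window_py (PySem.List.slice tokens (some (max 0 (idx - window)))
        (some (min (tokens.length : Int) (idx + window + 1)))) marker =
      (if PySem.Str.split₀ marker = [] then false
       else ((List.range (tokens.length + 1 - (PySem.Str.split₀ marker).length)).filter
          (fun j => (tokens.drop j).take (PySem.Str.split₀ marker).length = PySem.Str.split₀ marker)).any
        (fun j => decide (max 0 (idx - window) ≤ (j : Int)) &&
          decide ((j : Int) + (PySem.Str.split₀ marker).length ≤ min (tokens.length : Int) (idx + window + 1)))) := by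
  have hn : (0 : Int) ≤ tokens.length := by positivity
  have hlo : 0 ≤ max 0 (idx - window) := le_max_left 0 _
  by_cases hr : 0 ≤ idx + window + 1
  · -- the slice stop is non-negative: no wraparound, the window is the interval [lo, hi)
    rw [per_marker tokens marker _ _ hlo (le_min hn hr)]
    by_cases h0 : PySem.Str.split₀ marker = [] <;> simp [h0]
  · -- the slice stop is negative: Pre_'s condition makes A's span empty, and B's interval empty
    have hc' : (tokens.length : Int) + (idx + window + 1) ≤ max 0 (idx - window) :=
      hc.resolve_left hr
    have hspan : PySem.List.slice tokens (some (max 0 (idx - window)))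
        (some (min (tokens.length : Int) (idx + window + 1))) = [] := by
      apply List.length_eq_zero_iff.mp
      rw [PySem.List.length_slice]
      simp only [PySem.List.clampIdx]
      split_ifs <;> omega
    rw [hspan, miw_nil]
    by_cases h0 : PySem.Str.split₀ marker = []
    · simp [h0]
    · rw [if_neg h0]
      symm
      apply List.any_eq_false.mpr
      intro j _
      simp only [Bool.and_eq_true, decide_eq_true_eq, not_and]
      intro _
      omega

theorem any_filter_of_false {α : Type} (l : List α) (p : α → Bool) (f : α → Bool)
    (h : ∀ x ∈ l, p x = false → f x = false) : l.any f = (l.filter p).any f := by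
  rw [Bool.eq_iff_iff]
  simp only [List.any_eq_true, List.mem_filter]
  constructor
  · rintro ⟨x, hx, hf⟩
    refine ⟨x, ⟨hx, ?_⟩, hf⟩
    cases hpx : p x
    · rw [h x hx hpx] at hf; cases hf
    · rfl
  · rintro ⟨x, ⟨hx, -⟩, hf⟩
    exact ⟨x, hx, hf⟩

-- ===== VERDICT (by name: the statement is the Claim_ definition above) =====
theorem has_negation_near_py_spec : Claim_equal_has_negation_near_py := by
  unfold Claim_equal_has_negation_near_py
  intro tokens positions neg_markers window _hdom hpre
  unfold Spec_has_negation_near_py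
  simp only [has_negation_near_py, has_negation_near_py_alt]
  have hfold : (positions.foldl (fun acc i =>
      let lo := max 0 (i - window)
      let hi := min ((tokens.length : Int)) (i + window + 1)
      if lo < hi then acc ++ [(lo, hi)] else acc) []) =
      (positions.filter (fun i =>
        decide (max 0 (i - window) < min ((tokens.length : Int)) (i + window + 1)))).map
        (fun i => (max 0 (i - window), min ((tokens.length : Int)) (i + window + 1))) := by
    have hfun : (fun (acc : List (Int × Int)) (i : Int) =>
        let lo := max 0 (i - window)
        let hi := min ((tokens.length : Int)) (i + window + 1)
        if lo < hi then acc ++ [(lo, hi)] else acc) =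
        (fun acc i =>
          if (fun i => decide (max 0 (i - window) < min ((tokens.length : Int)) (i + window + 1))) i = true then
            acc ++ [(fun i => (max 0 (i - window), min ((tokens.length : Int)) (i + window + 1))) i]
          else acc) := by
      funext acc i
      by_cases h : max 0 (i - window) < min ((tokens.length : Int)) (i + window + 1) <;> simp [h]
    rw [hfun, PySem.List.foldl_append_if]
    simp
  rw [hfold]
  by_cases hp : positions = []
  · simp [hp]
  · rw [if_neg hp]
    have hdrop : ∀ idx ∈ positions,
        (fun i => decide (max 0 (i - window) < min ((tokens.length : Int)) (i + window + 1))) idx = false →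
        (neg_markers.any fun marker => marker_in_window_py
          (PySem.List.slice tokens (some (max 0 (idx - window)))
            (some (min (↑tokens.length) (idx + window + 1)))) marker) = false := by
      intro idx hidx hP
      simp only [decide_eq_false_iff_not, not_lt] at hP
      have hspan : PySem.List.slice tokens (some (max 0 (idx - window)))
          (some (min ((tokens.length : Int)) (idx + window + 1))) = [] := by
        apply List.length_eq_zero_iff.mp
        rw [PySem.List.length_slice]
        rcases hpre idx hidx with hr | hc'
        · simp only [PySem.List.clampIdx]; split_ifs <;> omega
        · simp only [PySem.List.clampIdx]; split_ifs <;> omega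
      rw [hspan]
      exact List.any_eq_false.mpr (fun m _ => by simp [miw_nil])
    rw [any_filter_of_false _ _ _ hdrop]
    by_cases hb : positions.filter (fun i =>
        decide (max 0 (i - window) < min ((tokens.length : Int)) (i + window + 1))) = []
    · rw [hb]; simp
    · rw [if_neg (fun h => hb (List.map_eq_nil_iff.mp h))]
      simp only [if_false_any, List.any_map]
      rw [any_any_comm]
      apply PySem.List.any_congr_mem
      intro marker _
      apply PySem.List.any_congr_mem
      intro idx hidx
      exact pair_eq tokens marker idx window (hpre idx (List.mem_filter.mp hidx).1)
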